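-- pv_equiv track=rewrite | github.com/HuZhuocheng/linuxSmallScripts | File_Operation/seperateMutiAllelic.py | split_sample_data
-- ===== SOURCE A (Python) =====
-- def split_sample_data(sample_data, format_keys, alt_count):
--     sample_fields = sample_data.split(':')
--     result = []
--     for i in range(alt_count):
--         new_sample_fields = []
--         for key, value in zip(format_keys, sample_fields):
--             if ',' in value:
--                 sub_values = value.split(',')
--                 if len(sub_values) == alt_count + 1:
--                     new_value = f"{sub_values[0]},{sub_values[i+1]}"
--                 elif len(sub_values) == alt_count:
--                     new_value = sub_values[i]
--                 else:
--                     new_value = value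
--             elif '/' in value:
--                 sub_values = value.split('/')
--                 new_value = f"{sub_values[0]}|{sub_values[1]}"
--             else:
--                 new_value = value
--             new_sample_fields.append(new_value)
--         result.append(':'.join(new_sample_fields))
--     return result
-- ===== SOURCE B (Python) =====
-- def split_sample_data(sample_data, format_keys, alt_count):
--     # Compile each sample field once into a "plan": a plain string when the
--     # field is the same for every allele, or a per-allele list of strings.
--     plans = []
--     for _key, value in zip(format_keys, sample_data.split(':')):
--         if ',' in value:
--             subs = value.split(',')
--             if len(subs) == alt_count + 1:
--                 plans.append([subs[0] + ',' + s for s in subs[1:]])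
--             elif len(subs) == alt_count:
--                 plans.append(subs)
--             else:
--                 plans.append(value)
--         elif '/' in value:
--             subs = value.split('/')
--             plans.append(subs[0] + '|' + subs[1])
--         else:
--             plans.append(value)
--     return [':'.join(p if isinstance(p, str) else p[i] for p in plans)
--             for i in range(alt_count)]
-- ===== Notes on version B (the rewrite author's own statement) =====
-- stated objective: alternative
-- what changed: Instead of A's nested loops that re-split every sample field once per allele, B makes a single compile pass turning each field into a plan (a constant string or a precomputed per-allele list) and then renders the alt_count output records by indexing the plans, so each field is split and its branch logic run exactly once.
import Mathlib
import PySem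

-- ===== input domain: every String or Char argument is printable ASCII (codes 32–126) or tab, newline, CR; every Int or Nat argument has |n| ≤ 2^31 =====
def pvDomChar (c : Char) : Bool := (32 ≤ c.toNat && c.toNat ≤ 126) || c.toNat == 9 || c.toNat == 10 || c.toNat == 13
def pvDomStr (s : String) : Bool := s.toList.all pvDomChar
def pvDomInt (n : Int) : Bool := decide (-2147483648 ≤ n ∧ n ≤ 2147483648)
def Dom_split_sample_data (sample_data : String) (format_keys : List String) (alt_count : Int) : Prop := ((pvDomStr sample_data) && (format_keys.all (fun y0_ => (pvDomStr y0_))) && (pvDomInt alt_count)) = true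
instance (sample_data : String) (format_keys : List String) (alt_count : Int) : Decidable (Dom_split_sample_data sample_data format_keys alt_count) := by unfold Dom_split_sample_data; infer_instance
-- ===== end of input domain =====

-- B compiles each sample field once into a plan (constant string or per-allele list),
-- then renders the alt_count records by indexing the plans (objective: alternative).


-- ===== PORT A =====
-- value.split(sep) for a fixed nonempty separator (split? is none only for sep = "")
def pvSplit (s : String) (sep : String) : List String :=
  (PySem.Str.split? s sep).getD []

-- A's loop body computing new_value for allele i and sample field value (branches in A's order)
def pvNewValue (alt_count i : Int) (value : String) : String :=
  if PySem.Str.isIn "," value then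
    if ((pvSplit value ",").length : Int) = alt_count + 1 then
      PySem.List.pyGetD (pvSplit value ",") 0 "" ++ "," ++ PySem.List.pyGetD (pvSplit value ",") (i + 1) ""
    else if ((pvSplit value ",").length : Int) = alt_count then
      PySem.List.pyGetD (pvSplit value ",") i ""
    else value
  else if PySem.Str.isIn "/" value then
    PySem.List.pyGetD (pvSplit value "/") 0 "" ++ "|" ++ PySem.List.pyGetD (pvSplit value "/") 1 ""
  else value

def split_sample_data (sample_data : String) (format_keys : List String) (alt_count : Int) : List String :=
  (PySem.List.pyRange 0 alt_count 1).foldl (fun result i =>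
    result ++ [PySem.Str.join ":"
      ((format_keys.zip (pvSplit sample_data ":")).foldl
        (fun acc kv => acc ++ [pvNewValue alt_count i kv.2]) [])]) []

-- ===== PORT B =====
-- B's plan for one field: .inl = constant across alleles, .inr = per-allele list
-- (Source B's subs[0]/subs[1]/p[i] are always in range when reached; ported via pyGetD with default "")
def pvPlan (alt_count : Int) (value : String) : String ⊕ List String :=
  if PySem.Str.isIn "," value then
    let subs := (PySem.Str.split? value ",").getD []
    if (subs.length : Int) = alt_count + 1 then
      Sum.inr ((PySem.List.slice subs (some 1) none).map
        (fun s => PySem.List.pyGetD subs 0 "" ++ "," ++ s))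
    else if (subs.length : Int) = alt_count then Sum.inr subs
    else Sum.inl value
  else if PySem.Str.isIn "/" value then
    let subs := (PySem.Str.split? value "/").getD []
    Sum.inl (PySem.List.pyGetD subs 0 "" ++ "|" ++ PySem.List.pyGetD subs 1 "")
  else Sum.inl value

def split_sample_data_alt (sample_data : String) (format_keys : List String) (alt_count : Int) : List String :=
  let plans := (format_keys.zip ((PySem.Str.split? sample_data ":").getD [])).map
    (fun kv => pvPlan alt_count kv.2)
  (PySem.List.pyRange 0 alt_count 1).map (fun i =>
    PySem.Str.join ":" (plans.map (Sum.elim id (fun l => PySem.List.pyGetD l i ""))))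

-- ===== PRECONDITION & SPEC =====
def Spec_split_sample_data (sample_data : String) (format_keys : List String) (alt_count : Int) (out : List String) : Prop := out = split_sample_data_alt sample_data format_keys alt_count
instance (sample_data : String) (format_keys : List String) (alt_count : Int) (out : List String) : Decidable (Spec_split_sample_data sample_data format_keys alt_count out) := by unfold Spec_split_sample_data; infer_instance

-- ===== CLAIM =====
def Claim_equal_split_sample_data : Prop := ∀ (sample_data : String) (format_keys : List String) (alt_count : Int), Dom_split_sample_data sample_data format_keys alt_count → Spec_split_sample_data sample_data format_keys alt_count (split_sample_data sample_data format_keys alt_count)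

-- ===== LEMMAS AND PROOFS =====

-- rendering B's plan at an in-range allele index gives A's new_value
lemma pvRender_plan (n i : Int) (v : String) (h0 : 0 ≤ i) (h1 : i < n) :
    Sum.elim id (fun l => PySem.List.pyGetD l i "") (pvPlan n v) = pvNewValue n i v := by
  simp only [pvPlan, pvNewValue, pvSplit]
  set subs := (PySem.Str.split? v ",").getD [] with hsubs
  split_ifs with hc hl1 hl2
  · -- length = n + 1 : per-allele list built by mapping over subs[1:]
    simp only [Sum.elim_inr]
    rw [PySem.List.slice_from_one]
    have hlen : ((subs.tail.map (fun s => PySem.List.pyGetD subs 0 "" ++ "," ++ s)).length : Int)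
        = n := by simp [List.length_tail]; omega
    rw [PySem.List.pyGetD_eq_getElem _ "" h0 (by omega)]
    have hi1 : (i + 1).toNat = i.toNat + 1 := by omega
    have hit : i.toNat < subs.tail.length := by
      simp [List.length_tail]; omega
    rw [List.getElem_map, List.getElem_tail]
    congr 1
    have hg := PySem.List.pyGetD_eq_getElem subs "" (show (0:Int) ≤ i + 1 by omega)
      (show i + 1 < (subs.length : Int) by omega)
    simp only [hg, hi1]
  · -- length = n : the list itself, same pyGetD
    rfl
  · rfl
  · rfl
  · rfl

-- ===== VERDICT =====
theorem split_sample_data_spec : Claim_equal_split_sample_data := by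
  intro sample_data format_keys alt_count _
  unfold Spec_split_sample_data split_sample_data split_sample_data_alt
  rw [PySem.List.foldl_append_singleton_eq_map]
  simp only [List.nil_append, List.map_map, Function.comp_def]
  apply List.map_congr_left
  intro i hi
  obtain ⟨h0, h1⟩ := PySem.List.mem_pyRange_one.mp hi
  congr 1
  rw [PySem.List.foldl_append_singleton_eq_map]
  simp only [List.nil_append]
  apply List.map_congr_left
  intro kv _
  exact (pvRender_plan alt_count i kv.2 h0 h1).symm
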